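-- pv_equiv track=rewrite | github.com/bartosz-czerwinski/turbo_koder | encoder.py | turboencode
-- ===== SOURCE A (Python) =====
-- def encodedbit(g_matrix, input_bit, state):
--     n = len(g_matrix)
--     K = len(g_matrix[0])
--     m = K - 1
--     output = [0] * n
--     for i in range(n):
--         val = (g_matrix[i][0] * input_bit) % 2
--         for j in range(1, K):
--             val ^= (g_matrix[i][j] * state[j - 1]) % 2
--         output[i] = val
--     new_state = [input_bit] + state[: m - 1]
--     return output, new_state
--
-- def turboencode(g_matrix, info_bits, terminated_flag):
--     n = len(g_matrix)
--     K = len(g_matrix[0])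
--     m = K - 1
--     Linf = len(info_bits)
--     # dopisanie tail bits
--     if terminated_flag > 0:
--         L = Linf + m
--     else:
--         L = Linf
--
--     state = [0] * m
--     out_sequence = []
--     for i in range(L):
--         if i < Linf:
--             xk = info_bits[i]
--         else:
--             # dopisanie tail bits
--             xk = sum(g_matrix[0][j] * state[j - 1] for j in range(1, K)) % 2
--         xak = (g_matrix[0][0] * xk) % 2
--         for j in range(1, K):
--             xak ^= (g_matrix[0][j] * state[j - 1]) % 2
--         outputbits, state = encodedbit(g_matrix, xak, state)
--         outputbits[0] = xk
--         out_sequence.extend(outputbits)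
--     return out_sequence
-- ===== SOURCE B (Python) =====
-- def _parity(x):
--     return 0 if x == 0 else (x & 1) ^ _parity(x >> 1)
--
-- def turboencode(g_matrix, info_bits, terminated_flag):
--     K = len(g_matrix[0])
--     m = K - 1
--     Linf = len(info_bits)
--     L = Linf + m if terminated_flag > 0 else Linf
--     # one integer tap-mask per generator row: bit 0 = input tap, bits 1.. = state taps
--     masks = [sum(((row[j] & 1) << j) for j in range(K)) for row in g_matrix]
--     tail_mask = masks[0] >> 1          # state-only taps of the feedback row
--     reg = 0                            # shift register packed into one integer
--     out = []
--     for i in range(L):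
--         xk = info_bits[i] if i < Linf else _parity(reg & tail_mask)
--         xak = _parity(((reg << 1) | (xk & 1)) & masks[0])
--         packed = (reg << 1) | xak
--         out.append(xk)                 # systematic position carries the raw xk
--         out.extend(_parity(packed & mk) for mk in masks[1:])
--         reg = packed & ((1 << m) - 1)
--     return out
-- ===== Notes on version B (the rewrite author's own statement) =====
-- stated objective: faster
-- what changed: B packs the shift register into one integer and precomputes one tap bit-mask per generator row, so each output bit is the parity of a single AND instead of A's inner j-loop of per-tap multiply-mod-xor over the state list, and the register update is one shift-or-mask instead of list consing/slicing.
-- outside the precondition, e.g. on turboencode([[1, 1], [1]], [], 0): A returns [], B raises IndexError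
import Mathlib
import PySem

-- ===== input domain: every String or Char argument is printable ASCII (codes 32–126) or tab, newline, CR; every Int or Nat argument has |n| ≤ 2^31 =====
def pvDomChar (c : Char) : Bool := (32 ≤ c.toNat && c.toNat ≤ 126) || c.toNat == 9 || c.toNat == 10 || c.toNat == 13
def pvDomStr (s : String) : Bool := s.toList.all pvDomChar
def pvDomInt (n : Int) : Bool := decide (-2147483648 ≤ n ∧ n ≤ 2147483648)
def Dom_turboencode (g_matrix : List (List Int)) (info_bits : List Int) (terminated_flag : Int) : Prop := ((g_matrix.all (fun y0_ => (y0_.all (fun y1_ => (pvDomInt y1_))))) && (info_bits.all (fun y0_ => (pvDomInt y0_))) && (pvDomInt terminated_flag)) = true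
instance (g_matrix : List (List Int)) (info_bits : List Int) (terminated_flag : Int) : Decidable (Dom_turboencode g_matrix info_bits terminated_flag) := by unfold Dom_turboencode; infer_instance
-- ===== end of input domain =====

-- B replaces A's per-step inner tap loops over the state list by one precomputed integer
-- bit-mask per generator row and a shift register packed into a single integer (objective:
-- faster by a constant factor, as measured on the generated inputs).

-- ===== PORT A =====
-- helper `encodedbit` of A; the inner `for j in range(1, K)` XOR loop of one row:
def pvEncRowA (row : List Int) (K : Nat) (input_bit : Int) (state : List Int) : Int :=
  (List.range' 1 (K - 1)).foldl
    (fun v j => PySem.Int.bxor v (PySem.Int.mod (row.getD j 0 * state.getD (j - 1) 0) 2))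
    (PySem.Int.mod (row.getD 0 0 * input_bit) 2)

def pvEncodedbit (g : List (List Int)) (input_bit : Int) (state : List Int) : List Int × List Int :=
  let n := g.length
  let K := (g.getD 0 []).length
  let m : Int := (K : Int) - 1
  ((List.range n).map (fun i => pvEncRowA (g.getD i []) K input_bit state),
   input_bit :: PySem.List.slice state none (some (m - 1)))

-- the body of A's `for i in range(L)` loop (out_sequence, state) ↦ next (out_sequence, state)
def pvStepA (g : List (List Int)) (info : List Int) (acc : List Int × List Int) (i : Int) :
    List Int × List Int :=
  let K := (g.getD 0 []).length
  let state := acc.2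
  let xk : Int :=
    if i < (info.length : Int) then PySem.List.pyGetD info i 0
    else PySem.Int.mod
      ((List.range' 1 (K - 1)).foldl (fun s j => s + (g.getD 0 []).getD j 0 * state.getD (j - 1) 0) 0) 2
  let xak : Int :=
    (List.range' 1 (K - 1)).foldl
      (fun v j => PySem.Int.bxor v (PySem.Int.mod ((g.getD 0 []).getD j 0 * state.getD (j - 1) 0) 2))
      (PySem.Int.mod ((g.getD 0 []).getD 0 0 * xk) 2)
  let eb := pvEncodedbit g xak state
  (acc.1 ++ eb.1.set 0 xk, eb.2)

def turboencode (g_matrix : List (List Int)) (info_bits : List Int) (terminated_flag : Int) : List Int :=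
  let K := (g_matrix.getD 0 []).length
  let m : Int := (K : Int) - 1
  let L : Int := if terminated_flag > 0 then (info_bits.length : Int) + m else (info_bits.length : Int)
  -- `state = [0] * m` ([0]*-1 = [] matches m.toNat = 0)
  ((PySem.List.pyRange 0 L 1).foldl (pvStepA g_matrix info_bits) ([], List.replicate m.toNat 0)).1

-- ===== PORT B =====
-- port of Source B's `_parity`; recursion bottoms out at 0.  The guard is `x ≤ 0` (not `x == 0`)
-- only for Lean termination; every call site passes a nonnegative int, where this is exact.
def pvParity (x : Int) : Int :=
  if h : x ≤ 0 then 0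
  else PySem.Int.bxor (PySem.Int.band x 1) (pvParity (x >>> (1:Nat)))
termination_by x.toNat
decreasing_by
  rcases x with n | n
  · show n >>> 1 < n
    have hn : 0 < n := by
      rcases Nat.eq_zero_or_pos n with h0 | h0
      · subst h0; exact absurd le_rfl h
      · exact h0
    simp only [Nat.shiftRight_eq_div_pow, pow_one]
    omega
  · exact absurd (by omega : Int.negSucc n ≤ 0) h

-- `sum(((row[j] & 1) << j) for j in range(K))`
def pvMaskOf (K : Nat) (row : List Int) : Int :=
  (List.range K).foldl (fun s j => s + (PySem.Int.band (row.getD j 0) 1) <<< j) 0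

-- the body of Source B's `for i in range(L)` loop (out, reg) ↦ next (out, reg)
def pvStepB (info : List Int) (masks : List Int) (tailMask : Int) (mN : Nat)
    (acc : List Int × Int) (i : Int) : List Int × Int :=
  let reg := acc.2
  let xk : Int :=
    if i < (info.length : Int) then PySem.List.pyGetD info i 0
    else pvParity (PySem.Int.band reg tailMask)
  let xak : Int :=
    pvParity (PySem.Int.band (PySem.Int.bor (reg <<< (1:Nat)) (PySem.Int.band xk 1)) (masks.getD 0 0))
  let packed : Int := PySem.Int.bor (reg <<< (1:Nat)) xak
  (acc.1 ++ xk :: (masks.drop 1).map (fun mk => pvParity (PySem.Int.band packed mk)),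
   PySem.Int.band packed (((1:Int) <<< mN) - 1))

def turboencode_alt (g_matrix : List (List Int)) (info_bits : List Int) (terminated_flag : Int) : List Int :=
  let K := (g_matrix.getD 0 []).length
  let m : Int := (K : Int) - 1
  let L : Int := if terminated_flag > 0 then (info_bits.length : Int) + m else (info_bits.length : Int)
  let masks := g_matrix.map (pvMaskOf K)
  let tailMask := masks.getD 0 0 >>> (1:Nat)
  -- `(1 << m)`: m ≥ 0 whenever the loop body runs (Pre_), so `m.toNat` is exact there
  ((PySem.List.pyRange 0 L 1).foldl (pvStepB info_bits masks tailMask m.toNat) ([], (0 : Int))).1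

-- ===== PRECONDITION & SPEC =====
-- Pre_ excludes: an empty g_matrix (A raises IndexError at once) and a ragged g_matrix with a
-- row shorter than row 0 (A raises IndexError whenever a bit is encoded, and with no bits to
-- encode — empty input, no termination — A only accidentally returns []); also the K = 0 rows
-- where the loop would run (A raises IndexError on g_matrix[i][0]).
def Pre_turboencode (g_matrix : List (List Int)) (info_bits : List Int) (terminated_flag : Int) : Prop :=
  g_matrix ≠ [] ∧
  (∀ row ∈ g_matrix, (g_matrix.headD []).length ≤ row.length) ∧
  (1 ≤ (g_matrix.headD []).length ∨
    (if 0 < terminated_flag then info_bits.length ≤ 1 else info_bits = []))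
instance (g_matrix : List (List Int)) (info_bits : List Int) (terminated_flag : Int) : Decidable (Pre_turboencode g_matrix info_bits terminated_flag) := by unfold Pre_turboencode; infer_instance

def pvWitness_turboencode : List (List Int) × List Int × Int :=
  ([[1, 1, 1], [1, 0, 1]], [1, 0, 1, 1], 1)

def Spec_turboencode (g_matrix : List (List Int)) (info_bits : List Int) (terminated_flag : Int) (out : List Int) : Prop := out = turboencode_alt g_matrix info_bits terminated_flag
instance (g_matrix : List (List Int)) (info_bits : List Int) (terminated_flag : Int) (out : List Int) : Decidable (Spec_turboencode g_matrix info_bits terminated_flag out) := by unfold Spec_turboencode; infer_instance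

-- ===== CLAIM (what is proved, stated in full; the proofs are below) =====
def Claim_equal_turboencode : Prop := ∀ (g_matrix : List (List Int)) (info_bits : List Int) (terminated_flag : Int), Dom_turboencode g_matrix info_bits terminated_flag → Pre_turboencode g_matrix info_bits terminated_flag → Spec_turboencode g_matrix info_bits terminated_flag (turboencode g_matrix info_bits terminated_flag)

-- ===== LEMMAS AND PROOFS =====

theorem band_one_cases (t : Int) : PySem.Int.band t 1 = 0 ∨ PySem.Int.band t 1 = 1 := by
  rw [PySem.Int.band_one, PySem.Int.mod_eq_emod_of_pos (by norm_num)]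
  exact Int.emod_two_eq t

theorem pvParity_natCast (n : Nat) :
    pvParity (n : Int) = if n = 0 then 0 else PySem.Int.bxor ((n % 2 : Nat) : Int) (pvParity ((n / 2 : Nat) : Int)) := by
  rw [pvParity]
  have hsh : ((n : Int) >>> (1:Nat)) = ((n >>> 1 : Nat) : Int) := rfl
  have hdiv : n >>> 1 = n / 2 := by simp [Nat.shiftRight_eq_div_pow]
  split_ifs with h1 h2
  · rfl
  · omega
  · omega
  · rw [hsh, hdiv]
    congr 1
    rw [show ((1:Int)) = ((1:Nat):Int) from rfl, PySem.Int.band_natCast]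
    simp [Nat.and_one_is_mod]

theorem parity_bit (X y : Nat) (hy : y < 2) :
    pvParity ((2 * X + y : Nat) : Int) = PySem.Int.bxor (y : Int) (pvParity (X : Int)) := by
  rw [pvParity_natCast]
  split_ifs with h
  · have hx : X = 0 := by omega
    have hy0 : y = 0 := by omega
    subst hx; subst hy0
    rw [pvParity_natCast]; decide
  · have h2 : (2 * X + y) % 2 = y := by omega
    have h3 : (2 * X + y) / 2 = X := by omega
    rw [h2, h3]

theorem pv_land_rec (a c b d : Nat) (hb : b < 2) (hd : d < 2) :
    (2*a+b) &&& (2*c+d) = 2*(a &&& c) + b*d := by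
  interval_cases b <;> interval_cases d
  · simpa [Nat.bit, Nat.bit_val] using Nat.land_bit false a false c
  · simpa [Nat.bit, Nat.bit_val] using Nat.land_bit false a true c
  · simpa [Nat.bit, Nat.bit_val] using Nat.land_bit true a false c
  · simpa [Nat.bit, Nat.bit_val] using Nat.land_bit true a true c

theorem pv_lor_bit (a b : Nat) (hb : b < 2) : 2*a ||| b = 2*a + b := by
  interval_cases b
  · simp
  · simpa [Nat.bit, Nat.bit_val] using Nat.lor_bit false a true 0

-- mask of a tap row, low bit first
def pvMkN : List Int → Nat
  | [] => 0
  | t :: ts => (PySem.Int.band t 1).toNat + 2 * pvMkN ts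

-- xor of taps times bits of p, low bit first
def pvXf : List Int → Nat → Int
  | [], _ => 0
  | t :: ts, p => PySem.Int.bxor (PySem.Int.band t 1 * ((p % 2 : Nat) : Int)) (pvXf ts (p / 2))

theorem band_one_toNat (t : Int) : PySem.Int.band t 1 = ((PySem.Int.band t 1).toNat : Int) ∧ (PySem.Int.band t 1).toNat < 2 := by
  rcases band_one_cases t with h | h <;> rw [h] <;> exact ⟨rfl, by norm_num⟩

theorem pv_key (ts : List Int) (p : Nat) :
    pvParity (((p &&& pvMkN ts : Nat)) : Int) = pvXf ts p := by
  induction ts generalizing p with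
  | nil => rw [pvMkN]; simp [pvXf]; rw [pvParity]; simp
  | cons t ts ih =>
    obtain ⟨hcast, hlt⟩ := band_one_toNat t
    rw [pvMkN, pvXf]
    have hp : p = 2 * (p / 2) + p % 2 := by omega
    have hmask : (PySem.Int.band t 1).toNat + 2 * pvMkN ts = 2 * pvMkN ts + (PySem.Int.band t 1).toNat := by omega
    rw [hmask]
    calc pvParity ((p &&& (2 * pvMkN ts + (PySem.Int.band t 1).toNat) : Nat) : Int)
        = pvParity (((2*(p/2) + p%2) &&& (2 * pvMkN ts + (PySem.Int.band t 1).toNat) : Nat) : Int) := by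
          rw [← hp]
      _ = pvParity ((2 * ((p/2) &&& pvMkN ts) + (p % 2) * (PySem.Int.band t 1).toNat : Nat) : Int) := by
          rw [pv_land_rec _ _ _ _ (by omega) hlt]
      _ = PySem.Int.bxor (((p % 2) * (PySem.Int.band t 1).toNat : Nat) : Int) (pvParity (((p/2) &&& pvMkN ts : Nat) : Int)) := by
          exact parity_bit _ _ (by nlinarith [Nat.mod_lt p (show 0 < 2 by norm_num)])
      _ = PySem.Int.bxor (PySem.Int.band t 1 * ((p % 2 : Nat) : Int)) (pvXf ts (p / 2)) := by
          rw [ih]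
          congr 1
          rw [Nat.cast_mul, ← hcast]
          ring

theorem pv_mod2_cases (a : Int) : PySem.Int.mod a 2 = 0 ∨ PySem.Int.mod a 2 = 1 := by
  rw [PySem.Int.mod_eq_emod_of_pos (by norm_num)]
  exact Int.emod_two_eq a

theorem pv_modmul (a x : Int) : PySem.Int.mod (a * x) 2 = PySem.Int.band a 1 * PySem.Int.band x 1 := by
  rw [PySem.Int.band_one, PySem.Int.band_one,
      PySem.Int.mod_eq_emod_of_pos (by norm_num), PySem.Int.mod_eq_emod_of_pos (by norm_num),
      PySem.Int.mod_eq_emod_of_pos (by norm_num)]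
  rw [Int.mul_emod]
  rcases Int.emod_two_eq a with h | h <;> rcases Int.emod_two_eq x with h' | h' <;>
    rw [h, h'] <;> decide

theorem pv_padd (a b : Int) : PySem.Int.mod (a + b) 2 = PySem.Int.bxor (PySem.Int.mod a 2) (PySem.Int.mod b 2) := by
  rw [PySem.Int.mod_eq_emod_of_pos (by norm_num), PySem.Int.mod_eq_emod_of_pos (by norm_num),
      PySem.Int.mod_eq_emod_of_pos (by norm_num)]
  rw [Int.add_emod]
  rcases Int.emod_two_eq a with h | h <;> rcases Int.emod_two_eq b with h' | h' <;>
    rw [h, h'] <;> decide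

theorem pv_bxor_bit (a b : Int) (ha : a = 0 ∨ a = 1) (hb : b = 0 ∨ b = 1) :
    PySem.Int.bxor a b = 0 ∨ PySem.Int.bxor a b = 1 := by
  rcases ha with h | h <;> rcases hb with h' | h' <;> rw [h, h'] <;> decide

theorem pv_mulbit (t : Int) (y : Nat) (hy : y < 2) :
    PySem.Int.band t 1 * (y : Int) = 0 ∨ PySem.Int.band t 1 * (y : Int) = 1 := by
  rcases band_one_cases t with h | h <;> rw [h] <;> interval_cases y <;> simp

theorem pvXf01 (ts : List Int) (p : Nat) : pvXf ts p = 0 ∨ pvXf ts p = 1 := by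
  induction ts generalizing p with
  | nil => left; rfl
  | cons t ts ih =>
    exact pv_bxor_bit _ _ (pv_mulbit t (p % 2) (by omega)) (ih (p / 2))

theorem pv_bxor_assoc_bit (a b c : Int) (ha : a = 0 ∨ a = 1) (hb : b = 0 ∨ b = 1) (hc : c = 0 ∨ c = 1) :
    PySem.Int.bxor (PySem.Int.bxor a b) c = PySem.Int.bxor a (PySem.Int.bxor b c) := by
  rcases ha with h | h <;> rcases hb with h' | h' <;> rcases hc with h'' | h'' <;>
    rw [h, h', h''] <;> decide

theorem pv_getD_tail (l : List Int) (k : Nat) : l.tail.getD k 0 = l.getD (k+1) 0 := by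
  cases l <;> simp

theorem pv_shift_div (rn k : Nat) : rn >>> (k+1) = (rn / 2) >>> k := by
  simp only [Nat.shiftRight_eq_div_pow]
  rw [pow_succ, Nat.div_div_eq_div_mul]
  ring_nf

theorem pv_bandcast_small (y : Nat) (hy : y < 2) : PySem.Int.band (y : Int) 1 = (y : Int) := by
  interval_cases y <;> decide

theorem pv_foldax (n : Nat) (rt state : List Int) (rn : Nat) (s : Int)
    (hn : n ≤ rt.length)
    (hbits : ∀ k, k < n → state.getD k 0 = (((rn >>> k) % 2 : Nat) : Int))
    (hs : s = 0 ∨ s = 1) :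
    (List.range n).foldl (fun v k => PySem.Int.bxor v (PySem.Int.mod (rt.getD k 0 * state.getD k 0) 2)) s
      = PySem.Int.bxor s (pvXf (rt.take n) rn) := by
  induction n generalizing rt state rn s with
  | zero => simp [pvXf]
  | succ n ih =>
    rcases rt with _ | ⟨t, ts⟩
    · simp at hn
    have hstate0 : state.getD 0 0 = ((rn % 2 : Nat) : Int) := by
      simpa using hbits 0 (by omega)
    rw [List.range_succ_eq_map, List.foldl_cons, List.foldl_map]
    have hstep : ∀ (v : Int) (k : Nat),
        PySem.Int.bxor v (PySem.Int.mod ((t :: ts).getD (k+1) 0 * state.getD (k+1) 0) 2)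
          = PySem.Int.bxor v (PySem.Int.mod (ts.getD k 0 * state.tail.getD k 0) 2) := by
      intro v k
      rw [List.getD_cons_succ, pv_getD_tail]
    have hs1 : PySem.Int.bxor s (PySem.Int.mod ((t :: ts).getD 0 0 * state.getD 0 0) 2) = 0 ∨
        PySem.Int.bxor s (PySem.Int.mod ((t :: ts).getD 0 0 * state.getD 0 0) 2) = 1 :=
      pv_bxor_bit _ _ hs (pv_mod2_cases _)
    calc (List.range n).foldl
          (fun v k => PySem.Int.bxor v (PySem.Int.mod ((t :: ts).getD (k+1) 0 * state.getD (k+1) 0) 2))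
          (PySem.Int.bxor s (PySem.Int.mod ((t :: ts).getD 0 0 * state.getD 0 0) 2))
        = (List.range n).foldl
          (fun v k => PySem.Int.bxor v (PySem.Int.mod (ts.getD k 0 * state.tail.getD k 0) 2))
          (PySem.Int.bxor s (PySem.Int.mod ((t :: ts).getD 0 0 * state.getD 0 0) 2)) := by
          exact List.foldl_ext _ _ _ (fun acc a _ => hstep acc a)
      _ = PySem.Int.bxor (PySem.Int.bxor s (PySem.Int.mod (t * state.getD 0 0) 2)) (pvXf (ts.take n) (rn / 2)) := by
          refine ih ts state.tail (rn / 2) _ (by simpa using hn) ?_ hs1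
          intro k hk
          rw [pv_getD_tail, hbits (k+1) (by omega), pv_shift_div]
      _ = PySem.Int.bxor s (pvXf ((t :: ts).take (n+1)) rn) := by
          rw [List.take_succ_cons, pvXf]
          rw [hstate0, pv_modmul, pv_bandcast_small (rn % 2) (by omega)]
          exact pv_bxor_assoc_bit _ _ _ hs (pv_mulbit t (rn % 2) (by omega)) (pvXf01 _ _)

theorem pv_sumax (n : Nat) (rt state : List Int) (rn : Nat) (c : Int)
    (hn : n ≤ rt.length)
    (hbits : ∀ k, k < n → state.getD k 0 = (((rn >>> k) % 2 : Nat) : Int)) :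
    PySem.Int.mod ((List.range n).foldl (fun s k => s + rt.getD k 0 * state.getD k 0) c) 2
      = PySem.Int.bxor (PySem.Int.mod c 2) (pvXf (rt.take n) rn) := by
  induction n generalizing rt state rn c with
  | zero => simp [pvXf]
  | succ n ih =>
    rcases rt with _ | ⟨t, ts⟩
    · simp at hn
    have hstate0 : state.getD 0 0 = ((rn % 2 : Nat) : Int) := by
      simpa using hbits 0 (by omega)
    rw [List.range_succ_eq_map, List.foldl_cons, List.foldl_map]
    calc PySem.Int.mod ((List.range n).foldl
            (fun s k => s + (t :: ts).getD (k+1) 0 * state.getD (k+1) 0)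
            (c + (t :: ts).getD 0 0 * state.getD 0 0)) 2
        = PySem.Int.mod ((List.range n).foldl
            (fun s k => s + ts.getD k 0 * state.tail.getD k 0)
            (c + (t :: ts).getD 0 0 * state.getD 0 0)) 2 := by
          congr 1
          refine List.foldl_ext _ _ _ (fun acc a _ => ?_)
          rw [List.getD_cons_succ, pv_getD_tail]
      _ = PySem.Int.bxor (PySem.Int.mod (c + t * state.getD 0 0) 2) (pvXf (ts.take n) (rn / 2)) := by
          refine ih ts state.tail (rn / 2) _ (by simpa using hn) ?_
          intro k hk
          rw [pv_getD_tail, hbits (k+1) (by omega), pv_shift_div]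
      _ = PySem.Int.bxor (PySem.Int.mod c 2) (pvXf ((t :: ts).take (n+1)) rn) := by
          rw [List.take_succ_cons, pvXf, pv_padd]
          rw [hstate0, pv_modmul, pv_bandcast_small (rn % 2) (by omega)]
          exact pv_bxor_assoc_bit _ _ _ (pv_mod2_cases c) (pv_mulbit t (rn % 2) (by omega)) (pvXf01 _ _)

theorem pv_foldl_add {α : Type} (l : List α) (f : α → Int) (c : Int) :
    l.foldl (fun s x => s + f x) c = c + (l.map f).sum := by
  induction l generalizing c with
  | nil => simp
  | cons x l ih => simp [ih]; ring

theorem pv_sum_two_mul {α : Type} (l : List α) (f : α → Int) :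
    (l.map (fun x => 2 * f x)).sum = 2 * (l.map f).sum := by
  induction l with
  | nil => simp
  | cons x l ih => simp [ih]; ring

theorem pv_maskB (K : Nat) (row : List Int) (h : K ≤ row.length) :
    pvMaskOf K row = ((pvMkN (row.take K) : Nat) : Int) := by
  induction K generalizing row with
  | zero => simp [pvMaskOf, pvMkN]
  | succ K ih =>
    rcases row with _ | ⟨t, ts⟩
    · simp at h
    obtain ⟨hcast, hlt⟩ := band_one_toNat t
    rw [pvMaskOf, List.range_succ_eq_map, List.foldl_cons, List.foldl_map, pv_foldl_add]
    simp only [List.getD_cons_zero, List.getD_cons_succ, Nat.succ_eq_add_one, zero_add]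
    have h0 : PySem.Int.band t 1 <<< (0:Nat) = PySem.Int.band t 1 := by
      simp [Int.shiftLeft_eq]
    have hterm : ∀ k : Nat, k ∈ List.range K →
        PySem.Int.band (ts.getD k 0) 1 <<< (k+1) = 2 * (PySem.Int.band (ts.getD k 0) 1 <<< k) := by
      intro k _
      rw [Int.shiftLeft_eq, Int.shiftLeft_eq, pow_succ]
      ring
    rw [h0, List.map_congr_left hterm, pv_sum_two_mul]
    have hih := ih ts (by simpa using h)
    rw [pvMaskOf, pv_foldl_add, zero_add] at hih
    rw [hih, List.take_succ_cons, pvMkN]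
    push_cast
    omega

theorem pv_bit_mod_pow (n k m : Nat) (h : k < m) : ((n % 2^m) >>> k) % 2 = (n >>> k) % 2 := by
  simp only [Nat.shiftRight_eq_div_pow]
  have hpow : 2^m = 2^k * 2^(m-k) := by
    rw [← pow_add]; congr 1; omega
  rw [hpow, Nat.mod_mul_right_div_self]
  exact Nat.mod_mod_of_dvd _ (dvd_pow_self 2 (by omega))

theorem pv_getD_take (l : List Int) (n k : Nat) (h : k < n) : (l.take n).getD k 0 = l.getD k 0 := by
  simp only [List.getD_eq_getElem?_getD]
  rw [List.getElem?_take_of_lt h]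

def pvInv (m : Nat) (state : List Int) (rn : Nat) : Prop :=
  ∀ k, k < m → state.getD k 0 = (((rn >>> k) % 2 : Nat) : Int)

theorem pv_inv_step (m rn xn : Nat) (hx : xn < 2) (state : List Int) (hinv : pvInv m state rn) :
    pvInv m (((xn : Nat) : Int) :: state.take (m - 1)) ((2 * rn + xn) % 2^m) := by
  intro k hk
  rcases k with _ | k
  · rw [List.getD_cons_zero]
    congr 1
    rw [Nat.shiftRight_zero, Nat.mod_mod_of_dvd _ (dvd_pow_self 2 (by omega : m ≠ 0))]
    omega
  · rw [List.getD_cons_succ, pv_getD_take _ _ _ (by omega), hinv k (by omega)]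
    congr 1
    rw [pv_bit_mod_pow _ _ _ hk]
    simp only [Nat.shiftRight_eq_div_pow]
    rw [pow_succ']
    rw [← Nat.div_div_eq_div_mul]
    congr 2
    omega

theorem pv_rowA (row state : List Int) (K : Nat) (rn bx : Nat) (x : Int)
    (hK : 1 ≤ K) (hlen : K ≤ row.length)
    (hinv : pvInv (K - 1) state rn)
    (hbx : bx < 2) (hx : PySem.Int.band x 1 = ((bx : Nat) : Int)) :
    pvEncRowA row K x state = pvXf (row.take K) (2 * rn + bx) := by
  rcases row with _ | ⟨t, ts⟩
  · simp at hlen; omega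
  rw [pvEncRowA, List.range'_eq_map_range, List.foldl_map]
  have hext : ∀ (v : Int) (k : Nat), k ∈ List.range (K - 1) →
      PySem.Int.bxor v (PySem.Int.mod ((t :: ts).getD (1 + k) 0 * state.getD (1 + k - 1) 0) 2)
        = PySem.Int.bxor v (PySem.Int.mod (ts.getD k 0 * state.getD k 0) 2) := by
    intro v k _
    rw [show 1 + k = k + 1 from by omega]
    simp [List.getD_cons_succ]
  rw [List.foldl_ext _ _ _ (fun acc a ha => hext acc a ha)]
  rw [pv_foldax (K - 1) ts state rn _ (by simp at hlen ⊢; omega) (fun k hk => hinv k hk)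
        (pv_mod2_cases _)]
  have hKeq : K - 1 + 1 = K := by omega
  rcases (show ∃ K', K = K' + 1 from ⟨K - 1, by omega⟩) with ⟨K', rfl⟩
  rw [List.take_succ_cons, pvXf]
  have hp2 : (2 * rn + bx) % 2 = bx := by omega
  have hpd : (2 * rn + bx) / 2 = rn := by omega
  rw [hp2, hpd]
  rw [List.getD_cons_zero, pv_modmul, hx]
  simp only [Nat.add_sub_cancel]


theorem pv_witness_ok :
    Dom_turboencode pvWitness_turboencode.1 pvWitness_turboencode.2.1 pvWitness_turboencode.2.2 ∧
    Pre_turboencode pvWitness_turboencode.1 pvWitness_turboencode.2.1 pvWitness_turboencode.2.2 := by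
  constructor <;> decide


theorem pv_castShiftL (rn : Nat) : ((rn : Int)) <<< (1:Nat) = ((2 * rn : Nat) : Int) := by
  rw [Int.shiftLeft_eq]
  push_cast
  ring

theorem pv_castShiftR (n : Nat) : ((n : Int)) >>> (1:Nat) = ((n / 2 : Nat) : Int) := by
  have h : ((n : Int)) >>> (1:Nat) = ((n >>> 1 : Nat) : Int) := rfl
  rw [h]
  simp [Nat.shiftRight_eq_div_pow]

theorem pv_packedCast (rn b : Nat) (hb : b < 2) :
    PySem.Int.bor (((rn : Nat) : Int) <<< (1:Nat)) ((b : Nat) : Int) = ((2 * rn + b : Nat) : Int) := by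
  rw [pv_castShiftL, PySem.Int.bor_natCast, pv_lor_bit _ _ hb]

theorem pv_rowB (K : Nat) (row : List Int) (p : Nat) (hlen : K ≤ row.length) :
    pvParity (PySem.Int.band ((p : Nat) : Int) (pvMaskOf K row)) = pvXf (row.take K) p := by
  rw [pv_maskB K row hlen, PySem.Int.band_natCast, pv_key]

theorem pv_newregCast (p mN : Nat) :
    PySem.Int.band ((p : Nat) : Int) (((1:Int) <<< mN) - 1) = ((p % 2^mN : Nat) : Int) := by
  have h1 : ((1:Int) <<< mN) - 1 = ((2^mN - 1 : Nat) : Int) := by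
    rw [Int.shiftLeft_eq]
    have : (1:Nat) ≤ 2^mN := Nat.one_le_two_pow
    push_cast [this]
    ring
  rw [h1, PySem.Int.band_natCast, Nat.and_two_pow_sub_one_eq_mod]

theorem pv_tailA (t : Int) (ts state : List Int) (K rn : Nat)
    (hK : 1 ≤ K) (hlen : K ≤ (t :: ts).length) (hinv : pvInv (K - 1) state rn) :
    PySem.Int.mod ((List.range' 1 (K - 1)).foldl
        (fun s j => s + (t :: ts).getD j 0 * state.getD (j - 1) 0) 0) 2
      = pvXf (ts.take (K - 1)) rn := by
  rw [List.range'_eq_map_range, List.foldl_map]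
  have hext : ∀ (v : Int) (k : Nat), k ∈ List.range (K - 1) →
      v + (t :: ts).getD (1 + k) 0 * state.getD (1 + k - 1) 0
        = v + ts.getD k 0 * state.getD k 0 := by
    intro v k _
    rw [show 1 + k = k + 1 from by omega]
    simp
  rw [List.foldl_ext _ _ _ (fun acc a ha => hext acc a ha)]
  rw [pv_sumax (K - 1) ts state rn 0 (by simp at hlen ⊢; omega) (fun k hk => hinv k hk)]
  have h0 : PySem.Int.mod 0 2 = 0 := by decide
  rw [h0]
  rcases pvXf01 (ts.take (K - 1)) rn with h | h <;> rw [h] <;> decide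

theorem pv_tailB (t : Int) (ts : List Int) (K rn : Nat)
    (hK : 1 ≤ K) (hlen : K ≤ (t :: ts).length) :
    pvParity (PySem.Int.band ((rn : Nat) : Int) (pvMaskOf K (t :: ts) >>> (1:Nat)))
      = pvXf (ts.take (K - 1)) rn := by
  obtain ⟨hcast, hlt⟩ := band_one_toNat t
  rw [pv_maskB K (t :: ts) hlen]
  rcases (show ∃ K', K = K' + 1 from ⟨K - 1, by omega⟩) with ⟨K', rfl⟩
  rw [List.take_succ_cons, pvMkN, pv_castShiftR]
  have hdiv : ((PySem.Int.band t 1).toNat + 2 * pvMkN (ts.take K')) / 2 = pvMkN (ts.take K') := by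
    omega
  rw [hdiv, PySem.Int.band_natCast, pv_key]
  simp

theorem pv_map_range (l : List (List Int)) (F : List Int → Int) :
    (List.range l.length).map (fun i => F (l.getD i [])) = l.map F := by
  induction l with
  | nil => simp
  | cons x xs ih =>
    rw [List.length_cons, List.range_succ_eq_map, List.map_cons, List.map_map, List.map_cons]
    simp only [List.getD_cons_zero]
    congr 1


-- named sub-expressions of the two step functions (all definitional equalities)
def pvXkA (g : List (List Int)) (info : List Int) (state : List Int) (i : Int) : Int :=
  if i < (info.length : Int) then PySem.List.pyGetD info i 0
  else PySem.Int.mod ((List.range' 1 ((g.getD 0 []).length - 1)).foldl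
    (fun s j => s + (g.getD 0 []).getD j 0 * state.getD (j - 1) 0) 0) 2

theorem pvStepA_parts (g : List (List Int)) (info : List Int) (acc : List Int × List Int) (i : Int) :
    pvStepA g info acc i =
      (acc.1 ++ ((List.range g.length).map (fun r =>
          pvEncRowA (g.getD r []) (g.getD 0 []).length
            (pvEncRowA (g.getD 0 []) (g.getD 0 []).length (pvXkA g info acc.2 i) acc.2) acc.2)).set 0
          (pvXkA g info acc.2 i),
       pvEncRowA (g.getD 0 []) (g.getD 0 []).length (pvXkA g info acc.2 i) acc.2 ::
         PySem.List.slice acc.2 none (some (((g.getD 0 []).length : Int) - 1 - 1))) := rfl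

def pvXkB (info : List Int) (tailMask : Int) (reg : Int) (i : Int) : Int :=
  if i < (info.length : Int) then PySem.List.pyGetD info i 0
  else pvParity (PySem.Int.band reg tailMask)

def pvXakB (info : List Int) (masks : List Int) (tailMask : Int) (reg : Int) (i : Int) : Int :=
  pvParity (PySem.Int.band
    (PySem.Int.bor (reg <<< (1:Nat)) (PySem.Int.band (pvXkB info tailMask reg i) 1))
    (masks.getD 0 0))

def pvPackedB (info : List Int) (masks : List Int) (tailMask : Int) (reg : Int) (i : Int) : Int :=
  PySem.Int.bor (reg <<< (1:Nat)) (pvXakB info masks tailMask reg i)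

theorem pvStepB_parts (info : List Int) (masks : List Int) (tailMask : Int) (mN : Nat)
    (acc : List Int × Int) (i : Int) :
    pvStepB info masks tailMask mN acc i =
      (acc.1 ++ pvXkB info tailMask acc.2 i ::
          (masks.drop 1).map (fun mk =>
            pvParity (PySem.Int.band (pvPackedB info masks tailMask acc.2 i) mk)),
       PySem.Int.band (pvPackedB info masks tailMask acc.2 i) (((1:Int) <<< mN) - 1)) := rfl

theorem pv_setmap (g0 : List Int) (gr : List (List Int)) (F : List Int → Int) (xkv : Int) :
    ((List.range (g0 :: gr).length).map (fun r => F ((g0 :: gr).getD r []))).set 0 xkv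
      = xkv :: gr.map F := by
  rw [List.length_cons, List.range_succ_eq_map, List.map_cons, List.map_map, List.set_cons_zero]
  congr 1
  rw [← pv_map_range gr F]
  apply List.map_congr_left
  intro k _
  simp

theorem pv_step (g0 : List Int) (gr : List (List Int)) (info : List Int)
    (state out : List Int) (rn : Nat) (i : Int)
    (hK : 1 ≤ g0.length)
    (hrows : ∀ row ∈ (g0 :: gr), g0.length ≤ row.length)
    (hinv : pvInv (g0.length - 1) state rn) :
    (pvStepA (g0 :: gr) info (out, state) i).1
        = (pvStepB info ((g0 :: gr).map (pvMaskOf g0.length))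
            ((((g0 :: gr).map (pvMaskOf g0.length)).getD 0 0) >>> (1:Nat))
            (g0.length - 1) (out, ((rn : Nat) : Int)) i).1
      ∧ ∃ rn' : Nat,
        (pvStepB info ((g0 :: gr).map (pvMaskOf g0.length))
            ((((g0 :: gr).map (pvMaskOf g0.length)).getD 0 0) >>> (1:Nat))
            (g0.length - 1) (out, ((rn : Nat) : Int)) i).2 = ((rn' : Nat) : Int)
        ∧ pvInv (g0.length - 1) (pvStepA (g0 :: gr) info (out, state) i).2 rn' := by
  rcases g0 with _ | ⟨t, ts⟩
  · simp at hK
  rw [pvStepA_parts, pvStepB_parts]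
  simp only [List.getD_cons_zero, List.map_cons, List.drop_succ_cons, List.drop_zero]
  set K := (t :: ts).length with hKdef
  set masks := pvMaskOf K (t :: ts) :: gr.map (pvMaskOf K) with hmasks
  set tailM := (pvMaskOf K (t :: ts)) >>> (1:Nat) with htailM
  have hKpos : 1 ≤ K := hK
  have hlen0 : K ≤ (t :: ts).length := le_refl _
  set xkv := pvXkA ((t :: ts) :: gr) info state i with hxkv
  -- the two xk values agree
  have hxkBA : pvXkB info tailM ((rn : Nat) : Int) i = xkv := by
    rw [pvXkB, hxkv, pvXkA]
    simp only [List.getD_cons_zero]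
    split_ifs with h
    · rfl
    · rw [pv_tailA t ts state K rn hKpos hlen0 hinv, pv_tailB t ts K rn hKpos hlen0]
  obtain ⟨hbcast, hblt⟩ := band_one_toNat xkv
  set bx : Nat := (PySem.Int.band xkv 1).toNat with hbxdef
  set xa : Int := pvXf ((t :: ts).take K) (2 * rn + bx) with hxadef
  have hxakA : pvEncRowA (t :: ts) K xkv state = xa :=
    pv_rowA (t :: ts) state K rn bx xkv hKpos hlen0 hinv hblt hbcast
  have hxa01 : xa = 0 ∨ xa = 1 := by rw [hxadef]; exact pvXf01 _ _
  set xn : Nat := xa.toNat with hxndef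
  have hxnlt : xn < 2 := by rcases hxa01 with h | h <;> rw [hxndef, h] <;> norm_num
  have hxacast : xa = ((xn : Nat) : Int) := by
    rcases hxa01 with h | h <;> rw [hxndef, h] <;> rfl
  have hxakB : pvXakB info masks tailM ((rn : Nat) : Int) i = xa := by
    rw [pvXakB, hxkBA, hmasks]
    simp only [List.getD_cons_zero]
    rw [hbcast, pv_packedCast rn bx hblt, pv_rowB K (t :: ts) (2 * rn + bx) hlen0]
  have hpacked : pvPackedB info masks tailM ((rn : Nat) : Int) i = ((2 * rn + xn : Nat) : Int) := by
    rw [pvPackedB, hxakB, hxacast, pv_packedCast rn xn hxnlt]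
  have hrow : ∀ row ∈ gr,
      pvEncRowA row K xa state
        = pvParity (PySem.Int.band ((2 * rn + xn : Nat) : Int) (pvMaskOf K row)) := by
    intro row hmem
    have hlenr : K ≤ row.length := hrows row (List.mem_cons_of_mem _ hmem)
    rw [pv_rowB K row (2 * rn + xn) hlenr]
    exact pv_rowA row state K rn xn xa hKpos hlenr hinv hxnlt
      (by rw [hxacast, pv_bandcast_small xn hxnlt])
  refine ⟨?_, ⟨(2 * rn + xn) % 2^(K - 1), ?_, ?_⟩⟩
  · show out ++ _ = out ++ _
    congr 1
    rw [pv_setmap (t :: ts) gr (fun row => pvEncRowA row K (pvEncRowA (t :: ts) K xkv state) state) xkv, hxkBA, hxakA]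
    congr 1
    rw [hpacked, List.map_map]
    exact List.map_congr_left hrow
  · show PySem.Int.band (pvPackedB info masks tailM ((rn : Nat) : Int) i) _ = _
    rw [hpacked, pv_newregCast]
  · show pvInv (K - 1) (pvEncRowA (t :: ts) K xkv state :: PySem.List.slice state none (some ((K : Int) - 1 - 1))) _
    rw [hxakA, hxacast]
    rcases Nat.lt_or_ge K 2 with hK1 | hK2
    · intro k hk
      omega
    · have hslice : PySem.List.slice state none (some ((K : Int) - 1 - 1))
          = state.take (K - 1 - 1) := by
        have hcast2 : ((K : Int) - 1 - 1) = (((K - 2 : Nat) : Nat) : Int) := by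
          push_cast
          omega
        rw [hcast2, PySem.List.slice_to_natCast]
        congr 1
      rw [hslice]
      exact pv_inv_step (K - 1) rn xn hxnlt state hinv


theorem pv_loop (g0 : List Int) (gr : List (List Int)) (info : List Int)
    (hK : 1 ≤ g0.length)
    (hrows : ∀ row ∈ (g0 :: gr), g0.length ≤ row.length) :
    ∀ (l : List Int) (out state : List Int) (rn : Nat), pvInv (g0.length - 1) state rn →
      (l.foldl (pvStepA (g0 :: gr) info) (out, state)).1
        = (l.foldl (pvStepB info ((g0 :: gr).map (pvMaskOf g0.length))
            ((((g0 :: gr).map (pvMaskOf g0.length)).getD 0 0) >>> (1:Nat))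
            (g0.length - 1)) (out, ((rn : Nat) : Int))).1 := by
  intro l
  induction l with
  | nil => intro out state rn _; rfl
  | cons i l ih =>
    intro out state rn hinv
    obtain ⟨h1, rn', h2, h3⟩ := pv_step g0 gr info state out rn i hK hrows hinv
    rw [List.foldl_cons, List.foldl_cons]
    have hSB : pvStepB info ((g0 :: gr).map (pvMaskOf g0.length))
          ((((g0 :: gr).map (pvMaskOf g0.length)).getD 0 0) >>> (1:Nat))
          (g0.length - 1) (out, ((rn : Nat) : Int)) i
        = ((pvStepA (g0 :: gr) info (out, state) i).1, ((rn' : Nat) : Int)) := by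
      apply Prod.ext
      · exact h1.symm
      · exact h2
    have hSA : pvStepA (g0 :: gr) info (out, state) i
        = ((pvStepA (g0 :: gr) info (out, state) i).1,
           (pvStepA (g0 :: gr) info (out, state) i).2) := rfl
    rw [hSB, hSA]
    exact ih _ _ rn' h3

-- ===== VERDICT (by name: the statement is the Claim_ definition above) =====
theorem turboencode_spec : Claim_equal_turboencode := by
  unfold Claim_equal_turboencode
  intro g info tf hdom hpre
  unfold Spec_turboencode
  obtain ⟨hg, hrows, hdeg⟩ := hpre
  rcases g with _ | ⟨g0, gr⟩
  · exact absurd rfl hg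
  simp only [List.headD_cons] at hrows hdeg
  rw [turboencode, turboencode_alt]
  simp only [List.getD_cons_zero]
  by_cases hK : 1 ≤ g0.length
  · have hm : (((g0.length : Int)) - 1).toNat = g0.length - 1 := by omega
    rw [hm]
    have hinv0 : pvInv (g0.length - 1) (List.replicate (g0.length - 1) 0) 0 := by
      intro k hk
      simp [List.getD_eq_getElem?_getD, List.getElem?_replicate, hk]
    exact pv_loop g0 gr info hK hrows _ _ _ 0 hinv0
  · have hK0 : g0.length = 0 := by omega
    have hL : (if tf > 0 then (info.length : Int) + ((g0.length : Int) - 1)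
        else (info.length : Int)) ≤ 0 := by
      have hdeg' := hdeg.resolve_left hK
      rw [hK0]
      split_ifs with h
      · rw [if_pos h] at hdeg'
        push_cast
        omega
      · rw [if_neg (by omega : ¬ 0 < tf)] at hdeg'
        rw [hdeg']
        simp
    rw [PySem.List.pyRange_one_eq_nil hL]
    rfl
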